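-- pv_equiv track=rewrite | github.com/miliar/Code_Jam_Webscraper | solutions_python/Problem_96/571.py | makeScores
-- ===== SOURCE A (Python) =====
-- def makeScores(s):
--     scores = []
--     c = int(s / 3)
--     c1 = c - 3
--     if c1 < 0:
--         c1 = 0
--     for i1 in range(c1, c + 3):
--         for i2 in range(c1, c + 3):
--             for i3 in range(c1, c + 3):
--                 if i1 + i2 + i3 == s:
--                     ss = [i1, i2, i3]
--                     ss.sort()
--                     if ss[0] + 2 >= ss[2]:
--                         try:
--                             scores.index(ss)
--                         except:
--                             scores.append(ss)
--     return scores
-- ===== SOURCE B (Python) =====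
-- def makeScores(s):
--     c = int(s / 3)
--     c1 = max(0, c - 3)
--     hi = c + 3
--     res = []
--     for i1 in range(c1, hi):
--         for i2 in range(i1, hi):
--             for i3 in range(i2, hi):
--                 if i1 + i2 + i3 == s and i3 - i1 <= 2:
--                     res.append([i1, i2, i3])
--     return res
-- ===== Notes on version B (the rewrite author's own statement) =====
-- stated objective: simpler
-- what changed: B enumerates candidate triples directly in ascending order (each nested range starts at the previous index), so A's per-triple sort, the spread re-check on the sorted copy, and the linear-scan duplicate test (try index/except append) all disappear; each qualifying triple is appended exactly once.
import Mathlib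
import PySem

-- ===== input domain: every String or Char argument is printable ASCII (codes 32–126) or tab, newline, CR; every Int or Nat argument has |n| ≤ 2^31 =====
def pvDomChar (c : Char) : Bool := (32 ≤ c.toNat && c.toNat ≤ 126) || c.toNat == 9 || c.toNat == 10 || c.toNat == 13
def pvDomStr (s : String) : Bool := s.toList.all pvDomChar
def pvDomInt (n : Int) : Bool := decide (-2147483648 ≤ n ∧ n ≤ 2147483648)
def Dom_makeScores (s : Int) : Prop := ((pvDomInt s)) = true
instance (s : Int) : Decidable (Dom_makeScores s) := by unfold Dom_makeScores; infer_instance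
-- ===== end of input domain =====

-- B enumerates the sorted triples directly (ascending i1 ≤ i2 ≤ i3), so A's per-triple sort
-- and linear-scan dedup disappear; objective: simpler.

-- ===== PORT A =====
-- int(s/3) truncates toward zero for |s| ≤ 2^31: Int.tdiv.
-- ss[0]/ss[2]: ss always has length 3, so pyGet? is always some; .getD 0 is never used.
-- try: scores.index(ss) / except: scores.append(ss) = append iff index? finds nothing.
def makeScores (s : Int) : List (List Int) :=
  let c := s.tdiv 3
  let c1 := if c - 3 < 0 then 0 else c - 3
  (PySem.List.pyRange c1 (c + 3) 1).foldl (fun sc1 i1 =>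
    (PySem.List.pyRange c1 (c + 3) 1).foldl (fun sc2 i2 =>
      (PySem.List.pyRange c1 (c + 3) 1).foldl (fun sc3 i3 =>
        if i1 + i2 + i3 = s then
          let ss := PySem.List.sorted [i1, i2, i3] (fun x => x) false
          if (PySem.List.pyGet? ss 0).getD 0 + 2 ≥ (PySem.List.pyGet? ss 2).getD 0 then
            if (PySem.List.index? sc3 ss).isSome then sc3 else sc3 ++ [ss]
          else sc3
        else sc3) sc2) sc1) []

-- ===== PORT B =====
def makeScores_alt (s : Int) : List (List Int) :=
  let c := s.tdiv 3
  let c1 := max 0 (c - 3)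
  let hi := c + 3
  (PySem.List.pyRange c1 hi 1).foldl (fun r1 i1 =>
    (PySem.List.pyRange i1 hi 1).foldl (fun r2 i2 =>
      (PySem.List.pyRange i2 hi 1).foldl (fun r3 i3 =>
        if i1 + i2 + i3 = s ∧ i3 - i1 ≤ 2 then r3 ++ [[i1, i2, i3]] else r3) r2) r1) []

-- ===== PRECONDITION & SPEC =====
def Spec_makeScores (s : Int) (out : List (List Int)) : Prop := out = makeScores_alt s
instance (s : Int) (out : List (List Int)) : Decidable (Spec_makeScores s out) := by unfold Spec_makeScores; infer_instance

-- ===== CLAIM (what is proved, stated in full; the proofs are below) =====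
def Claim_equal_makeScores : Prop := ∀ (s : Int), Dom_makeScores s → Spec_makeScores s (makeScores s)

-- ===== LEMMAS AND PROOFS =====

set_option maxRecDepth 10000

def pvSort3 (a b c : Int) : List Int :=
  if a ≤ b then
    if b ≤ c then [a,b,c] else if a ≤ c then [a,c,b] else [c,a,b]
  else
    if a ≤ c then [b,a,c] else if b ≤ c then [b,c,a] else [c,b,a]

theorem pvSorted3 (a b c : Int) :
    PySem.List.sorted [a,b,c] (fun x => x) false = pvSort3 a b c := by
  apply PySem.List.sorted_id_eq_of_perm_of_pairwise
  · unfold pvSort3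
    split_ifs
    · exact .refl _
    · exact .cons a (.swap b c [])
    · exact .trans (.swap a c [b]) (.cons a (.swap b c []))
    · exact .swap a b [c]
    · exact .trans (.cons b (.swap a c [])) (.swap a b [c])
    · exact .trans (.swap b c [a]) (.trans (.cons b (.swap a c [])) (.swap a b [c]))
  · unfold pvSort3
    split_ifs <;> simp [List.pairwise_cons] <;> omega

theorem pvSort3_shift (a b c : Int) :
    pvSort3 (a+1) (b+1) (c+1) = (pvSort3 a b c).map (· + 1) := by
  unfold pvSort3
  simp only [add_le_add_iff_right]
  split_ifs <;> simp

theorem pvSort3_shape (a b c : Int) : ∃ x y z, pvSort3 a b c = [x, y, z] := by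
  unfold pvSort3; split_ifs <;> exact ⟨_, _, _, rfl⟩

theorem pvGet (x y z : Int) : (PySem.List.pyGet? [x,y,z] 0).getD 0 = x := rfl
theorem pvGet2 (x y z : Int) : (PySem.List.pyGet? [x,y,z] 2).getD 0 = z := rfl

theorem pvFoldlShift {σ τ : Type} (h : σ → τ) (l : List Int) (f : σ → Int → σ) (g : τ → Int → τ)
    (H : ∀ a x, x ∈ l → g (h a) (x+1) = h (f a x)) (acc : σ) :
    (l.map (· + 1)).foldl g (h acc) = h (l.foldl f acc) := by
  induction l generalizing acc with
  | nil => rfl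
  | cons y t ih =>
    simp only [List.map_cons, List.foldl_cons, H acc y (by simp)]
    exact ih (fun a x hx => H a x (by simp [hx])) (f acc y)

theorem pvRangeShift (a b : Int) :
    PySem.List.pyRange (a+1) (b+1) 1 = (PySem.List.pyRange a b 1).map (· + 1) := by
  rw [PySem.List.pyRange_one, PySem.List.pyRange_one, List.map_map]
  have h1 : b + 1 - (a + 1) = b - a := by ring
  rw [h1]
  apply List.map_congr_left
  intro k _
  simp
  ring

theorem pvMapShiftMem (v : List Int) (l : List (List Int)) :
    v.map (· + 1) ∈ l.map (List.map (· + 1)) ↔ v ∈ l := by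
  constructor
  · intro h
    rcases List.mem_map.mp h with ⟨w, hw, he⟩
    have : w = v := by
      have : ∀ (x y : List Int), x.map (· + 1) = y.map (· + 1) → x = y := by
        intro x y hxy
        have := congrArg (List.map (· - 1)) hxy
        simpa [List.map_map, Function.comp_def] using this
      exact this w v he
    exact this ▸ hw
  · intro h
    exact List.mem_map_of_mem h

theorem pvBodyShiftA (i1 i2 i3 : Int) (a : List (List Int)) :
    (let ss := PySem.List.sorted [i1+1, i2+1, i3+1] (fun x => x) false
     if (PySem.List.pyGet? ss 0).getD 0 + 2 ≥ (PySem.List.pyGet? ss 2).getD 0 then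
       if (PySem.List.index? (a.map (List.map (· + 1))) ss).isSome then a.map (List.map (· + 1))
       else a.map (List.map (· + 1)) ++ [ss]
     else a.map (List.map (· + 1)))
    = (let ss := PySem.List.sorted [i1, i2, i3] (fun x => x) false
       if (PySem.List.pyGet? ss 0).getD 0 + 2 ≥ (PySem.List.pyGet? ss 2).getD 0 then
         if (PySem.List.index? a ss).isSome then a else a ++ [ss]
       else a).map (List.map (· + 1)) := by
  obtain ⟨x, y, z, hxyz⟩ := pvSort3_shape i1 i2 i3
  have h1 : PySem.List.sorted [i1+1, i2+1, i3+1] (fun x => x) false = [x+1, y+1, z+1] := by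
    have : [i1+1, i2+1, i3+1] = [i1+(1:Int), i2+1, i3+1] := rfl
    rw [pvSorted3, pvSort3_shift, hxyz]; rfl
  rw [h1, pvSorted3, hxyz]
  simp only [pvGet, pvGet2]
  by_cases h2 : x + 2 ≥ z
  · rw [if_pos (show x + 1 + 2 ≥ z + 1 by omega), if_pos h2]
    by_cases h3 : [x, y, z] ∈ a
    · have hmem : [x+1, y+1, z+1] ∈ a.map (List.map (· + 1)) := by
        have := (pvMapShiftMem [x, y, z] a).mpr h3
        simpa using this
      rw [if_pos ((PySem.List.index?_isSome_iff _ _).mpr hmem), if_pos ((PySem.List.index?_isSome_iff _ _).mpr h3)]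
    · have hmem : [x+1, y+1, z+1] ∉ a.map (List.map (· + 1)) := by
        intro hc
        exact h3 ((pvMapShiftMem [x, y, z] a).mp (by simpa using hc))
      rw [if_neg (by simp [hmem]), if_neg (by simp [h3])]
      simp
  · rw [if_neg (show ¬ (x + 1 + 2 ≥ z + 1) by omega), if_neg h2]

theorem pvTdivSucc {s : Int} (hs : 0 ≤ s) : (s + 3).tdiv 3 = s.tdiv 3 + 1 := by
  rw [Int.tdiv_eq_ediv_of_nonneg (by omega), Int.tdiv_eq_ediv_of_nonneg hs]; omega

theorem pvTdivGe3 {s : Int} (hs : 9 ≤ s) : 3 ≤ s.tdiv 3 := by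
  rw [Int.tdiv_eq_ediv_of_nonneg (by omega)]; omega

theorem pvShiftA {s : Int} (hs : 9 ≤ s) :
    makeScores (s + 3) = (makeScores s).map (List.map (· + 1)) := by
  have hc3 : 3 ≤ s.tdiv 3 := pvTdivGe3 hs
  have ht : (s + 3).tdiv 3 = s.tdiv 3 + 1 := pvTdivSucc (by omega)
  unfold makeScores
  simp only [ht]
  rw [if_neg (show ¬ (s.tdiv 3 + 1 - 3 < 0) by omega),
      if_neg (show ¬ (s.tdiv 3 - 3 < 0) by omega),
      show s.tdiv 3 + 1 - 3 = (s.tdiv 3 - 3) + 1 by ring,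
      show s.tdiv 3 + 1 + 3 = (s.tdiv 3 + 3) + 1 by ring,
      pvRangeShift]
  have := pvFoldlShift (List.map (List.map (· + 1))) (PySem.List.pyRange (s.tdiv 3 - 3) (s.tdiv 3 + 3) 1)
    (fun sc1 i1 =>
      (PySem.List.pyRange (s.tdiv 3 - 3) (s.tdiv 3 + 3) 1).foldl (fun sc2 i2 =>
        (PySem.List.pyRange (s.tdiv 3 - 3) (s.tdiv 3 + 3) 1).foldl (fun sc3 i3 =>
          if i1 + i2 + i3 = s then
            let ss := PySem.List.sorted [i1, i2, i3] (fun x => x) false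
            if (PySem.List.pyGet? ss 0).getD 0 + 2 ≥ (PySem.List.pyGet? ss 2).getD 0 then
              if (PySem.List.index? sc3 ss).isSome then sc3 else sc3 ++ [ss]
            else sc3
          else sc3) sc2) sc1)
    (fun sc1 i1 =>
      ((PySem.List.pyRange (s.tdiv 3 - 3) (s.tdiv 3 + 3) 1).map (· + 1)).foldl (fun sc2 i2 =>
        ((PySem.List.pyRange (s.tdiv 3 - 3) (s.tdiv 3 + 3) 1).map (· + 1)).foldl (fun sc3 i3 =>
          if i1 + i2 + i3 = s + 3 then
            let ss := PySem.List.sorted [i1, i2, i3] (fun x => x) false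
            if (PySem.List.pyGet? ss 0).getD 0 + 2 ≥ (PySem.List.pyGet? ss 2).getD 0 then
              if (PySem.List.index? sc3 ss).isSome then sc3 else sc3 ++ [ss]
            else sc3
          else sc3) sc2) sc1)
    (fun a1 i1 _ => by
      exact pvFoldlShift (List.map (List.map (· + 1))) _ _ _
        (fun a2 i2 _ => pvFoldlShift (List.map (List.map (· + 1))) _ _ _
          (fun a3 i3 _ => by
            by_cases hsum : i1 + i2 + i3 = s
            · rw [if_pos (show i1 + 1 + (i2 + 1) + (i3 + 1) = s + 3 by omega), if_pos hsum]
              exact pvBodyShiftA i1 i2 i3 a3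
            · rw [if_neg (show ¬ (i1 + 1 + (i2 + 1) + (i3 + 1) = s + 3) by omega), if_neg hsum]) a2) a1)
    []
  simpa using this

theorem pvShiftB {s : Int} (hs : 9 ≤ s) :
    makeScores_alt (s + 3) = (makeScores_alt s).map (List.map (· + 1)) := by
  have hc3 : 3 ≤ s.tdiv 3 := pvTdivGe3 hs
  have ht : (s + 3).tdiv 3 = s.tdiv 3 + 1 := pvTdivSucc (by omega)
  unfold makeScores_alt
  simp only [ht]
  rw [show max 0 (s.tdiv 3 + 1 - 3) = (max 0 (s.tdiv 3 - 3)) + 1 by omega,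
      show s.tdiv 3 + 1 + 3 = (s.tdiv 3 + 3) + 1 by ring,
      pvRangeShift]
  have := pvFoldlShift (List.map (List.map (· + 1))) (PySem.List.pyRange (max 0 (s.tdiv 3 - 3)) (s.tdiv 3 + 3) 1)
    (fun r1 i1 =>
      (PySem.List.pyRange i1 (s.tdiv 3 + 3) 1).foldl (fun r2 i2 =>
        (PySem.List.pyRange i2 (s.tdiv 3 + 3) 1).foldl (fun r3 i3 =>
          if i1 + i2 + i3 = s ∧ i3 - i1 ≤ 2 then r3 ++ [[i1, i2, i3]] else r3) r2) r1)
    (fun r1 i1 =>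
      (PySem.List.pyRange i1 ((s.tdiv 3 + 3) + 1) 1).foldl (fun r2 i2 =>
        (PySem.List.pyRange i2 ((s.tdiv 3 + 3) + 1) 1).foldl (fun r3 i3 =>
          if i1 + i2 + i3 = s + 3 ∧ i3 - i1 ≤ 2 then r3 ++ [[i1, i2, i3]] else r3) r2) r1)
    (fun a1 i1 _ => by
      beta_reduce
      rw [show PySem.List.pyRange (i1 + 1) (s.tdiv 3 + 3 + 1) 1
            = (PySem.List.pyRange i1 (s.tdiv 3 + 3) 1).map (· + 1) from pvRangeShift i1 (s.tdiv 3 + 3)]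
      exact pvFoldlShift (List.map (List.map (· + 1))) _ _ _
        (fun a2 i2 _ => by
          rw [show PySem.List.pyRange (i2 + 1) (s.tdiv 3 + 3 + 1) 1
                = (PySem.List.pyRange i2 (s.tdiv 3 + 3) 1).map (· + 1) from pvRangeShift i2 (s.tdiv 3 + 3)]
          exact pvFoldlShift (List.map (List.map (· + 1))) _ _ _
            (fun a3 i3 _ => by
              by_cases hc : i1 + i2 + i3 = s ∧ i3 - i1 ≤ 2
              · rw [if_pos (show i1 + 1 + (i2 + 1) + (i3 + 1) = s + 3 ∧ i3 + 1 - (i1 + 1) ≤ 2 by omega),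
                    if_pos hc]
                simp
              · rw [if_neg (show ¬ (i1 + 1 + (i2 + 1) + (i3 + 1) = s + 3 ∧ i3 + 1 - (i1 + 1) ≤ 2) by omega),
                    if_neg hc]) a2) a1)
    []
  simpa using this

theorem pvTdivNonposOfNeg {s : Int} (hs : s < 0) : s.tdiv 3 ≤ 0 := by
  have h1 : 0 ≤ (-s).tdiv 3 := Int.tdiv_nonneg (by omega) (by norm_num)
  have h2 : (-s).tdiv 3 = -(s.tdiv 3) := by rw [Int.neg_tdiv]
  omega

theorem pvFoldlFix {α β : Type} (l : List α) (f : β → α → β) (b : β)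
    (h : ∀ acc x, x ∈ l → f acc x = acc) : l.foldl f b = b := by
  induction l generalizing b with
  | nil => rfl
  | cons y t ih =>
    simp only [List.foldl_cons, h b y (by simp)]
    exact ih b fun acc x hx => h acc x (by simp [hx])

theorem pvNegA {s : Int} (hs : s < 0) : makeScores s = [] := by
  have hc : s.tdiv 3 ≤ 0 := pvTdivNonposOfNeg hs
  simp only [makeScores]
  rw [if_pos (show s.tdiv 3 - 3 < 0 by omega)]
  apply pvFoldlFix
  intro a1 i1 h1
  apply pvFoldlFix
  intro a2 i2 h2
  apply pvFoldlFix
  intro a3 i3 h3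
  rw [PySem.List.mem_pyRange_one] at h1 h2 h3
  rw [if_neg (show ¬ (i1 + i2 + i3 = s) by omega)]

theorem pvNegB {s : Int} (hs : s < 0) : makeScores_alt s = [] := by
  have hc : s.tdiv 3 ≤ 0 := pvTdivNonposOfNeg hs
  simp only [makeScores_alt]
  apply pvFoldlFix
  intro a1 i1 h1
  rw [PySem.List.mem_pyRange_one] at h1
  apply pvFoldlFix
  intro a2 i2 h2
  rw [PySem.List.mem_pyRange_one] at h2
  apply pvFoldlFix
  intro a3 i3 h3
  rw [PySem.List.mem_pyRange_one] at h3
  rw [if_neg (show ¬ (i1 + i2 + i3 = s ∧ i3 - i1 ≤ 2) by omega)]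

theorem pvBase : ∀ s ∈ PySem.List.pyRange 0 12 1, makeScores s = makeScores_alt s := by decide

theorem pvMainNat : ∀ n : Nat, makeScores (n : Int) = makeScores_alt (n : Int) := by
  intro n
  induction n using Nat.strong_induction_on with
  | _ n ih =>
    by_cases h : n < 12
    · exact pvBase (n : Int) (by rw [PySem.List.mem_pyRange_one]; omega)
    · have h9 : (9 : Int) ≤ ((n - 3 : Nat) : Int) := by omega
      have e : (n : Int) = ((n - 3 : Nat) : Int) + 3 := by omega
      rw [e, pvShiftA h9, pvShiftB h9, ih (n - 3) (by omega)]

theorem pvMain (s : Int) : makeScores s = makeScores_alt s := by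
  rcases lt_or_ge s 0 with h | h
  · rw [pvNegA h, pvNegB h]
  · have e : s = ((s.toNat : Nat) : Int) := by omega
    rw [e]
    exact pvMainNat s.toNat

-- ===== VERDICT (by name: the statement is the Claim_ definition above) =====
theorem makeScores_spec : Claim_equal_makeScores := by
  intro s _
  exact pvMain s
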